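-- pv_equiv track=rewrite | github.com/wenting-zhao/lex-leader | bibds.py | make_matrixvar
-- ===== SOURCE A (Python) =====
-- def make_matrixvar(num_c, num_r):
--     matrix2var = dict()
--     i = 1
--     for c in range(num_c):
--         for r in range(num_r):
--             matrix2var[(c, r)] = i
--             i += 1
--     return matrix2var
-- ===== SOURCE B (Python) =====
-- def make_matrixvar(num_c, num_r):
--     # single flat pass: cell id i+1 at coordinates divmod(i, num_r)
--     if num_c <= 0 or num_r <= 0:
--         return {}
--     return {divmod(i, num_r): i + 1 for i in range(num_c * num_r)}
-- ===== Notes on version B (the rewrite author's own statement) =====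
-- stated objective: alternative
-- what changed: The two nested loops with a running counter are replaced by a single flat loop over range(num_c*num_r) that recovers each cell's coordinates from the flat index with divmod(i, num_r), so the dict is built in one pass with no nested iteration and no maintained counter.
import Mathlib
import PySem

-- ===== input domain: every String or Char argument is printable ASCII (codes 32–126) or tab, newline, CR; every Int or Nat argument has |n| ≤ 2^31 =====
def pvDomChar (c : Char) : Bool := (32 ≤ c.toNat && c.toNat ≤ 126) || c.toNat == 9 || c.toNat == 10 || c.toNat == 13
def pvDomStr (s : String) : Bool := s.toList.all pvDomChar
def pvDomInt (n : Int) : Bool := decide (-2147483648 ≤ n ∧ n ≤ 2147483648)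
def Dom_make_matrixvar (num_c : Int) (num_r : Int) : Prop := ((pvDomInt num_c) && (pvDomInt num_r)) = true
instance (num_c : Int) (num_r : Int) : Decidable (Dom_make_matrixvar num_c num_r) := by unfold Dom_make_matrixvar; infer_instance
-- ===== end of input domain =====

-- B replaces A's two nested loops with a running counter by ONE flat loop over
-- range(num_c*num_r), recovering each cell's coordinates as divmod(i, num_r); objective: alternative.
-- The dict is returned as its association list (keys here are always distinct).

-- ===== PORT A =====
-- the dict/counter state of A's nested loops; the dict's items are ((c, r), id) pairs
def make_matrixvar (num_c : Int) (num_r : Int) : List (Int × Int × Int) :=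
  let st : PySem.Dict (Int × Int) Int × Int :=
    (PySem.List.pyRange 0 num_c 1).foldl
      (fun st c =>
        (PySem.List.pyRange 0 num_r 1).foldl
          (fun st r => (st.1.insert (c, r) st.2, st.2 + 1)) st)
      (PySem.Dict.empty, 1)
  -- flatten ((c, r), i) items to the declared triple type
  st.1.items.map (fun p => (p.1.1, p.1.2, p.2))

-- ===== PORT B =====
-- single flat dict comprehension; keys divmod(i, num_r) are pairwise distinct, so the
-- dict's items are exactly the generated pairs in generation order
def make_matrixvar_alt (num_c : Int) (num_r : Int) : List (Int × Int × Int) :=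
  if num_c ≤ 0 ∨ num_r ≤ 0 then []
  else
    (PySem.List.pyRange 0 (num_c * num_r) 1).map
      (fun i => (PySem.Int.floordiv i num_r, PySem.Int.mod i num_r, i + 1))

-- ===== PRECONDITION & SPEC =====
def Spec_make_matrixvar (num_c : Int) (num_r : Int) (out : List (Int × Int × Int)) : Prop := out = make_matrixvar_alt num_c num_r
instance (num_c : Int) (num_r : Int) (out : List (Int × Int × Int)) : Decidable (Spec_make_matrixvar num_c num_r out) := by unfold Spec_make_matrixvar; infer_instance

-- ===== CLAIM (what is proved, stated in full; the proofs are below) =====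
def Claim_equal_make_matrixvar : Prop := ∀ (num_c : Int) (num_r : Int), Dom_make_matrixvar num_c num_r → Spec_make_matrixvar num_c num_r (make_matrixvar num_c num_r)

-- ===== LEMMAS AND PROOFS =====

-- inner loop of A: over fresh keys (c, r) for r ≥ a, appends ((c, r), i + (r - a)) and counts up
theorem mmv_inner (c : Int) : ∀ (n : Nat) (a : Int) (d : PySem.Dict (Int × Int) Int) (i : Int),
    (∀ r : Int, a ≤ r → d.contains (c, r) = false) →
    (PySem.List.pyRange a (a + n) 1).foldl
        (fun st r => (st.1.insert (c, r) st.2, st.2 + 1)) (d, i)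
      = (PySem.Dict.mk (d.items ++ (PySem.List.pyRange a (a + n) 1).map
            (fun r => ((c, r), i + (r - a)))), i + n) := by
  intro n
  induction n with
  | zero =>
    intro a d i h
    simp [PySem.List.pyRange_one_eq_nil (le_refl a)]
  | succ m ih =>
    intro a d i h
    have hlt : a < a + (m + 1 : Nat) := by push_cast; omega
    rw [PySem.List.pyRange_one_cons hlt, List.foldl_cons]
    have hfresh : d.contains (c, a) = false := h a le_rfl
    have hstep : (PySem.Dict.insert d (c, a) i).items = d.items ++ [((c, a), i)] :=
      PySem.Dict.items_insert_of_not_contains d i hfresh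
    have hrange : a + (m + 1 : Nat) = (a + 1) + (m : Nat) := by push_cast; omega
    have h' : ∀ r : Int, a + 1 ≤ r → (PySem.Dict.insert d (c, a) i).contains (c, r) = false := by
      intro r hr
      rw [PySem.Dict.contains_insert]
      have : ((c, r) == (c, a)) = false := by
        simp only [beq_eq_false_iff_ne, ne_eq, Prod.mk.injEq, not_and]
        intro _
        omega
      rw [this]
      simpa using h r (by omega)
    rw [hrange]
    rw [ih (a + 1) (PySem.Dict.insert d (c, a) i) (i + 1) h']
    refine Prod.ext ?_ (by push_cast; ring)
    apply PySem.Dict.ext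
    simp only [hstep]
    rw [List.map_cons, List.append_assoc, List.singleton_append]
    congr 2
    · congr 1
      ring
    · apply List.map_congr_left
      intro r _
      congr 1
      ring

-- outer loop of A (for 0 ≤ num_r): starting at column a with counter a*num_r + 1 and a dict
-- containing no key with first component ≥ a, it appends the column-by-column pairs
theorem mmv_outer (num_r : Int) (hnr : 0 ≤ num_r) :
    ∀ (n : Nat) (a : Int) (d : PySem.Dict (Int × Int) Int),
    (∀ (c r : Int), a ≤ c → d.contains (c, r) = false) →
    (PySem.List.pyRange a (a + n) 1).foldl
        (fun st c =>
          (PySem.List.pyRange 0 num_r 1).foldl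
            (fun st r => (st.1.insert (c, r) st.2, st.2 + 1)) st)
        (d, a * num_r + 1)
      = (PySem.Dict.mk (d.items ++ (PySem.List.pyRange a (a + n) 1).flatMap
            (fun c => (PySem.List.pyRange 0 num_r 1).map
              (fun r => ((c, r), c * num_r + r + 1)))), (a + n) * num_r + 1) := by
  intro n
  induction n with
  | zero =>
    intro a d h
    simp [PySem.List.pyRange_one_eq_nil (le_refl a)]
  | succ m ih =>
    intro a d h
    have hlt : a < a + (m + 1 : Nat) := by push_cast; omega
    rw [PySem.List.pyRange_one_cons hlt, List.foldl_cons]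
    have hnn : (0 : Int) + num_r.toNat = num_r := by omega
    have hin := mmv_inner a num_r.toNat 0 d (a * num_r + 1) (fun r _ => h a r le_rfl)
    rw [hnn] at hin
    rw [hin]
    set d' : PySem.Dict (Int × Int) Int :=
      PySem.Dict.mk (d.items ++ (PySem.List.pyRange 0 num_r 1).map
        (fun r => ((a, r), a * num_r + 1 + (r - 0)))) with hd'
    have hcnt : a * num_r + 1 + (num_r.toNat : Int) = (a + 1) * num_r + 1 := by
      push_cast [Int.toNat_of_nonneg hnr]; ring
    have h' : ∀ (c r : Int), a + 1 ≤ c → d'.contains (c, r) = false := by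
      intro c r hc
      have h1 := h c r (by omega)
      simp only [PySem.Dict.contains, hd'] at h1 ⊢
      simp only [List.any_append, h1, Bool.false_or, List.any_map, List.any_eq_false]
      intro x _
      simp only [Function.comp_apply, beq_iff_eq, Prod.mk.injEq, not_and]
      intro hax
      omega
    have hrange : a + (m + 1 : Nat) = (a + 1) + (m : Nat) := by push_cast; omega
    rw [hrange, hcnt, ih (a + 1) d' h']
    refine Prod.ext ?_ rfl
    apply PySem.Dict.ext
    simp only [hd', List.append_assoc, List.flatMap_cons]
    congr 2
    apply List.map_congr_left
    intro r _
    congr 1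
    ring

-- B's flat divmod pass over range(0, m*n) equals A's column-by-column generation
theorem mmv_flat (n : Int) (hn : 0 < n) : ∀ (m : Nat),
    (PySem.List.pyRange 0 (m * n) 1).map
        (fun i => (PySem.Int.floordiv i n, PySem.Int.mod i n, i + 1))
      = (PySem.List.pyRange 0 (m : Int) 1).flatMap
          (fun c => (PySem.List.pyRange 0 n 1).map (fun r => (c, r, c * n + r + 1))) := by
  intro m
  induction m with
  | zero => simp [PySem.List.pyRange_one_eq_nil (le_refl (0 : Int))]
  | succ k ih =>
    have h1 : (0 : Int) ≤ k * n := by positivity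
    have h2 : (k : Int) * n ≤ (k + 1 : Nat) * n := by push_cast; nlinarith
    have hsplit : PySem.List.pyRange 0 ((k + 1 : Nat) * n) 1
        = PySem.List.pyRange 0 (k * n) 1 ++ PySem.List.pyRange ((k : Int) * n) ((k + 1 : Nat) * n) 1 := by
      push_cast
      exact PySem.List.pyRange_one_append 0 ((k : Int) * n) ((k + 1) * n) h1 (by push_cast at h2 ⊢; omega)
    have hcsplit : PySem.List.pyRange 0 ((k + 1 : Nat) : Int) 1
        = PySem.List.pyRange 0 (k : Int) 1 ++ [(k : Int)] := by
      push_cast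
      exact PySem.List.pyRange_one_succ_right (by positivity)
    rw [hsplit, List.map_append, ih, hcsplit, List.flatMap_append]
    congr 1
    simp only [List.flatMap_cons, List.flatMap_nil, List.append_nil]
    -- the last block of n flat indices is column k
    have hshift : PySem.List.pyRange ((k : Int) * n) ((k + 1 : Nat) * n) 1
        = (PySem.List.pyRange 0 n 1).map (fun r => (k : Int) * n + r) := by
      rw [PySem.List.pyRange_one, PySem.List.pyRange_one]
      have e1 : (((k + 1 : Nat) : Int) * n - (k : Int) * n).toNat = (n - 0).toNat := by
        push_cast; congr 1; ring
      rw [e1, List.map_map]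
      apply List.map_congr_left
      intro x _
      simp
    rw [hshift, List.map_map]
    apply List.map_congr_left
    intro r hr
    have hrmem := (PySem.List.mem_pyRange_one).mp hr
    have hdiv : PySem.Int.floordiv ((k : Int) * n + r) n = k := by
      rw [PySem.Int.floordiv_eq_iff_of_pos hn]
      constructor <;> nlinarith [hrmem.1, hrmem.2]
    have hmod : PySem.Int.mod ((k : Int) * n + r) n = r := by
      have := PySem.Int.floordiv_mul_add_mod ((k : Int) * n + r) n
      rw [hdiv] at this
      omega
    simp only [Function.comp_apply, hdiv, hmod]

-- ===== VERDICT (by name: the statement is the Claim_ definition above) =====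
theorem make_matrixvar_spec : Claim_equal_make_matrixvar := by
  intro num_c num_r _
  unfold Spec_make_matrixvar make_matrixvar make_matrixvar_alt
  by_cases hdeg : num_c ≤ 0 ∨ num_r ≤ 0
  · rw [if_pos hdeg]
    rcases hdeg with h | h
    · rw [PySem.List.pyRange_one_eq_nil h]
      simp [PySem.Dict.empty]
    · rw [PySem.List.pyRange_one_eq_nil h]
      simp only [List.foldl_nil]
      rw [List.foldl_fixed' (fun _ => rfl) _]
      simp [PySem.Dict.empty]
  · push Not at hdeg
    obtain ⟨hnc, hnr⟩ := hdeg
    rw [if_neg (by omega)]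
    have h0 : (0 : Int) + num_c.toNat = num_c := by omega
    have hmul : (0 : Int) * num_r + 1 = 1 := by ring
    have hA := mmv_outer num_r (le_of_lt hnr) num_c.toNat 0 PySem.Dict.empty
      (fun c r _ => by simp)
    rw [h0, hmul] at hA
    rw [hA]
    have hB := mmv_flat num_r hnr num_c.toNat
    have hc : ((num_c.toNat : Int)) = num_c := by omega
    rw [hc] at hB
    rw [hB]
    simp [PySem.Dict.empty, List.map_flatMap, List.map_map, Function.comp_def]
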